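-- pv_equiv track=rewrite | github.com/Gaggu097/Advent_of_Code21 | day9/day9.py | check_if_lowest
-- ===== SOURCE A (Python) =====
-- def check_if_lowest(element, adjacents):
--     lent = len(adjacents)
--     count = 0
--     for i in range(0, lent):
--         if element < adjacents[i]:
--             count += 1
--     if count == lent:
--         return True
--     else:
--         return False
-- ===== SOURCE B (Python) =====
-- def check_if_lowest(element, adjacents):
--     return not adjacents or element < min(adjacents)
-- ===== Notes on version B (the rewrite author's own statement) =====
-- stated objective: simpler
-- what changed: Replaces the indexed counting loop (count comparisons, then compare count to the length) by reducing the list to its minimum and making a single comparison, with an emptiness guard matching A's True on the empty list.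
import Mathlib
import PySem

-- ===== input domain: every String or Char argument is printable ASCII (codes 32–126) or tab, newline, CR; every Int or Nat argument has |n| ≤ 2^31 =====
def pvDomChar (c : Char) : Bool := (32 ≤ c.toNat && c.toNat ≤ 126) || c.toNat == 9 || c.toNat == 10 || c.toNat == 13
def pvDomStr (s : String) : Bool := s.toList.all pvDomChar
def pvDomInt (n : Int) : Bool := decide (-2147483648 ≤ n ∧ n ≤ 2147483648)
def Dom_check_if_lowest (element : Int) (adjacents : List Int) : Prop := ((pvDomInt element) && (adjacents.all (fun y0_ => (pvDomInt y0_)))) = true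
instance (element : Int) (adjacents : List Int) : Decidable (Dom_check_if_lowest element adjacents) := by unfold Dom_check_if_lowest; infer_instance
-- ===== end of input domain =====

-- B reduces the list to its minimum and makes one comparison (guarding the empty
-- list) instead of counting successful comparisons and comparing to the length.
-- ===== PORT A =====
def check_if_lowest (element : Int) (adjacents : List Int) : Bool :=
  let lent : Int := adjacents.length
  let count : Int := (PySem.List.pyRange 0 lent 1).foldl
    (fun count i => if element < PySem.List.pyGetD adjacents i 0 then count + 1 else count) 0
  if count = lent then true else false

-- ===== PORT B =====
def check_if_lowest_alt (element : Int) (adjacents : List Int) : Bool :=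
  if adjacents.isEmpty then true
  else
    match PySem.List.min? adjacents (fun y => y) with
    | some m => decide (element < m)
    | none => true  -- unreachable: min? is none only on []

-- ===== PRECONDITION & SPEC =====
def Spec_check_if_lowest (element : Int) (adjacents : List Int) (out : Bool) : Prop := out = check_if_lowest_alt element adjacents
instance (element : Int) (adjacents : List Int) (out : Bool) : Decidable (Spec_check_if_lowest element adjacents out) := by unfold Spec_check_if_lowest; infer_instance

-- ===== CLAIM (what is proved, stated in full; the proofs are below) =====
def Claim_equal_check_if_lowest : Prop := ∀ (element : Int) (adjacents : List Int), Dom_check_if_lowest element adjacents → Spec_check_if_lowest element adjacents (check_if_lowest element adjacents)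

-- ===== LEMMAS AND PROOFS =====

-- A's count loop is countP (element < ·).
theorem count_loop_eq_countP (element : Int) (xs : List Int) :
    xs.foldl (fun count x => if element < x then count + 1 else count) (0 : Int)
      = (xs.countP (fun x => element < x) : Int) := by
  induction xs using List.reverseRecOn with
  | nil => simp
  | append_singleton t x ih =>
    simp [List.foldl_append, List.countP_append, ih, List.countP_cons]
    split <;> simp

theorem countP_eq_length_iff_min (element : Int) (x : Int) (t : List Int) :
    ((x :: t).countP (fun y => element < y) = (x :: t).length)
      ↔ element < t.foldl min x := by
  have hsome : PySem.List.min? (x :: t) (fun y => y) = some (t.foldl min x) :=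
    PySem.List.min?_id_cons x t
  have hmem : t.foldl min x ∈ (x :: t) := PySem.List.min?_mem hsome
  have hmin : ∀ y ∈ (x :: t), t.foldl min x ≤ y := by
    intro y hy; exact PySem.List.min?_isMin hsome y hy
  rw [List.countP_eq_length]
  constructor
  · intro h
    have : ∀ y ∈ (x :: t), element < y := by
      intro y hy; simpa using h y hy
    exact this _ hmem
  · intro h y hy
    have := hmin y hy
    simp only [decide_eq_true_eq]
    omega

-- ===== VERDICT (by name: the statement is the Claim_ definition above) =====
theorem check_if_lowest_spec : Claim_equal_check_if_lowest := by
  intro element adjacents _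
  unfold Spec_check_if_lowest check_if_lowest check_if_lowest_alt
  cases adjacents with
  | nil => simp
  | cons x t =>
    simp only []
    rw [PySem.List.foldl_pyRange_zero_pyGetD' (x :: t) 0
      (fun count y => if element < y then count + 1 else count) 0]
    rw [count_loop_eq_countP, PySem.List.min?_id_cons]
    simp only [List.isEmpty_cons, Bool.false_eq_true, if_false]
    have h := countP_eq_length_iff_min element x t
    by_cases hc : ((x :: t).countP (fun y => element < y) = (x :: t).length)
    · simp [hc, h.mp hc]
    · have hnot : ¬ element < t.foldl min x := fun hlt => hc (h.mpr hlt)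
      simp only [hnot, decide_false]
      rw [if_neg]
      intro heq
      apply hc
      omega
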